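-- pv_equiv track=rewrite | github.com/MarvinFS/CLD | src/cld/engines/whisper.py | _join_chunks
-- ===== SOURCE A (Python) =====
-- from typing import List, Optional
--
-- def _join_chunks(results: List[str]) -> str:
--     """Join chunk transcriptions, handling overlap artifacts.
--
--     The 5-second overlap may cause some words to be duplicated at boundaries.
--     This method attempts basic deduplication by detecting repeated word sequences.
--
--     Args:
--         results: List of transcribed text from each chunk
--
--     Returns:
--         Joined text with overlap deduplication.
--     """
--     if not results:
--         return ""
--     if len(results) == 1:
--         return results[0]
--
--     joined = results[0]
--     for i in range(1, len(results)):
--         next_text = results[i]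
--         if not next_text:
--             continue
--
--         joined_words = joined.split()
--         next_words = next_text.split()
--
--         # Check for 1-5 word overlap at boundary
--         overlap_found = False
--         if len(joined_words) >= 3 and len(next_words) >= 3:
--             for overlap_len in range(5, 0, -1):
--                 if len(joined_words) >= overlap_len and len(next_words) >= overlap_len:
--                     if joined_words[-overlap_len:] == next_words[:overlap_len]:
--                         # Found overlap, skip duplicate words
--                         joined = joined + " " + " ".join(next_words[overlap_len:])
--                         overlap_found = True
--                         break
--         if not overlap_found:
--             joined = joined + " " + next_text
--
--     return joined.strip()
-- ===== SOURCE B (Python) =====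
-- from typing import List
--
-- def _join_chunks(results: List[str]) -> str:
--     """Single pass keeping only O(1) boundary state: the last (at most) 5
--     accumulated words, a running word count and the output pieces, instead of
--     re-splitting the whole joined string; the overlap length is the maximum
--     matching prefix length found by an ascending scan (equal to A's first
--     match of the descending scan, since both pick the largest match)."""
--     if not results:
--         return ""
--     if len(results) == 1:
--         return results[0]
--
--     pieces = [results[0]]
--     first = results[0].split()
--     count = len(first)
--     tail = first[-5:]
--     for next_text in results[1:]:
--         if not next_text:
--             continue
--         nw = next_text.split()
--         best = 0
--         if count >= 3 and len(nw) >= 3: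
--             for m in range(1, min(5, count, len(nw)) + 1):
--                 if tail[len(tail) - m:] == nw[:m]:
--                     best = m
--         if best != 0:
--             kept = nw[best:]
--             pieces.append(" ".join(kept))
--         else:
--             kept = nw
--             pieces.append(next_text)
--         count += len(kept)
--         tail = (tail + kept)[-5:]
--     return " ".join(pieces).strip()
-- ===== Notes on version B (the rewrite author's own statement) =====
-- stated objective: faster
-- what changed: B never re-splits the accumulated string: it keeps O(1) boundary state per step (the last at most 5 accumulated words, a running word count, and the list of output pieces joined once at the end) and computes the overlap as the maximum match of an ascending 1..5 scan over that bounded tail, instead of A's descending first-match scan over the freshly re-split full word list.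
import Mathlib
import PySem

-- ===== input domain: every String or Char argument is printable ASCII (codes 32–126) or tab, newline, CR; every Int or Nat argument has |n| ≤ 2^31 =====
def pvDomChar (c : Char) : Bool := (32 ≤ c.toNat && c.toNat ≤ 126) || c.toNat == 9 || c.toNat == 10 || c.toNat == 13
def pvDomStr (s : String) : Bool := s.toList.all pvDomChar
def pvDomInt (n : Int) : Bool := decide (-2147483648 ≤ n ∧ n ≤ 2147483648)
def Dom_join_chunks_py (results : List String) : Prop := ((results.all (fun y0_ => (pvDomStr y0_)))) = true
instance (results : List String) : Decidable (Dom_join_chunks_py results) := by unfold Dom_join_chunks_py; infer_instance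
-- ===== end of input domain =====

-- B keeps only O(1) boundary state (the last ≤5 accumulated words, a running word count,
-- the output pieces) instead of re-splitting the whole joined string each chunk, and finds
-- the overlap as the maximum match of an ascending scan: asymptotically faster.

-- ===== PORT A =====
-- loop body of A's `for i in range(1, len(results))`; the inner `for overlap_len in
-- range(5, 0, -1): … break` is find? (first element satisfying the break condition)
def joinStepA (joined : String) (next_text : String) : String :=
  if next_text = "" then joined
  else
    let joined_words := PySem.Str.split₀ joined
    let next_words := PySem.Str.split₀ next_text
    let ov? : Option Int :=
      if 3 ≤ PySem.List.len joined_words ∧ 3 ≤ PySem.List.len next_words then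
        (PySem.List.pyRange 5 0 (-1)).find? (fun overlap_len =>
          decide (overlap_len ≤ PySem.List.len joined_words) &&
          decide (overlap_len ≤ PySem.List.len next_words) &&
          (PySem.List.slice joined_words (some (-overlap_len)) none ==
           PySem.List.slice next_words none (some overlap_len)))
      else none
    match ov? with
    | some overlap_len =>
        joined ++ " " ++ PySem.Str.join " " (PySem.List.slice next_words (some overlap_len) none)
    | none => joined ++ " " ++ next_text

def join_chunks_py (results : List String) : String :=
  if results = [] then ""
  else if results.length = 1 then PySem.List.pyGetD results 0 ""
  else
    let joined :=
      (PySem.List.pyRange 1 (PySem.List.len results)).foldl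
        (fun joined i => joinStepA joined (PySem.List.pyGetD results i ""))
        (PySem.List.pyGetD results 0 "")
    PySem.Str.strip joined

-- ===== PORT B =====
-- loop body of B: state = (pieces, tail (last ≤5 words), count); Python's ascending
-- `for m in range(1, …+1): if …: best = m` is the foldl, `best = 0` the initial value
def joinStepB (st : List String × List String × Int) (next_text : String) :
    List String × List String × Int :=
  if next_text = "" then st
  else
    let nw := PySem.Str.split₀ next_text
    let best : Int :=
      if 3 ≤ st.2.2 ∧ 3 ≤ PySem.List.len nw then
        (PySem.List.pyRange 1 (min 5 (min st.2.2 (PySem.List.len nw)) + 1) 1).foldl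
          (fun b m =>
            if PySem.List.slice st.2.1 (some (PySem.List.len st.2.1 - m)) none ==
               PySem.List.slice nw none (some m) then m else b) 0
      else 0
    if best ≠ 0 then
      let kept := PySem.List.slice nw (some best) none
      (st.1 ++ [PySem.Str.join " " kept],
       PySem.List.slice (st.2.1 ++ kept) (some (-5)) none,
       st.2.2 + PySem.List.len kept)
    else
      (st.1 ++ [next_text],
       PySem.List.slice (st.2.1 ++ nw) (some (-5)) none,
       st.2.2 + PySem.List.len nw)

def join_chunks_py_alt (results : List String) : String :=
  if results = [] then ""
  else if results.length = 1 then PySem.List.pyGetD results 0 ""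
  else
    let first := PySem.List.pyGetD results 0 ""
    let fw := PySem.Str.split₀ first
    let st := (results.drop 1).foldl joinStepB
      ([first], PySem.List.slice fw (some (-5)) none, PySem.List.len fw)
    PySem.Str.strip (PySem.Str.join " " st.1)

-- ===== PRECONDITION & SPEC =====
def Spec_join_chunks_py (results : List String) (out : String) : Prop := out = join_chunks_py_alt results
instance (results : List String) (out : String) : Decidable (Spec_join_chunks_py results out) := by unfold Spec_join_chunks_py; infer_instance

-- ===== CLAIM (what is proved, stated in full; the proofs are below) =====
def Claim_equal_join_chunks_py : Prop := ∀ (results : List String), Dom_join_chunks_py results → Spec_join_chunks_py results (join_chunks_py results)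

-- ===== LEMMAS AND PROOFS =====

-- the flushed accumulator of split₀.go factors out
theorem split0_go_acc (s : List Char) : ∀ (cur : List Char) (acc : List (List Char)),
    PySem.Chars.split₀.go s cur acc = acc.reverse ++ PySem.Chars.split₀.go s cur [] := by
  induction s with
  | nil =>
    intro cur acc
    simp [PySem.Chars.split₀.go]
    split <;> simp
  | cons c s ih =>
    intro cur acc
    simp only [PySem.Chars.split₀.go]
    split
    · split
      · exact ih [] acc
      · rw [ih [] (cur.reverse :: acc), ih [] [cur.reverse]]; simp
    · exact ih (c :: cur) acc

theorem split0_go_space_append (t s : List Char) : ∀ (cur : List Char) (acc : List (List Char)),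
    PySem.Chars.split₀.go (s ++ ' ' :: t) cur acc =
      PySem.Chars.split₀.go s cur acc ++ PySem.Chars.split₀.go t [] [] := by
  induction s with
  | nil =>
    intro cur acc
    simp only [List.nil_append, PySem.Chars.split₀.go]
    rw [show PySem.Chars.isspace ' ' = true from by decide]
    simp only [if_true]
    by_cases hc : cur.isEmpty = true
    · simp only [hc, if_true]
      rw [split0_go_acc t [] acc]
    · simp only [hc]
      rw [split0_go_acc t [] (cur.reverse :: acc)]
      simp
  | cons c s ih =>
    intro cur acc
    simp only [List.cons_append, PySem.Chars.split₀.go]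
    split
    · split
      · exact ih [] acc
      · exact ih [] _
    · exact ih (c :: cur) acc

-- split₀ distributes over a single-space concatenation
theorem split0_append_space (s t : List Char) :
    PySem.Chars.split₀ (s ++ ' ' :: t) = PySem.Chars.split₀ s ++ PySem.Chars.split₀ t := by
  simp [PySem.Chars.split₀, split0_go_space_append]

theorem split0_go_pieces (s : List Char) : ∀ (cur : List Char) (acc : List (List Char)),
    (∀ w ∈ acc, w ≠ [] ∧ ∀ c ∈ w, PySem.Chars.isspace c = false) →
    (∀ c ∈ cur, PySem.Chars.isspace c = false) →
    ∀ w ∈ PySem.Chars.split₀.go s cur acc, w ≠ [] ∧ ∀ c ∈ w, PySem.Chars.isspace c = false := by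
  induction s with
  | nil =>
    intro cur acc hacc hcur
    simp only [PySem.Chars.split₀.go]
    by_cases hc : cur.isEmpty = true
    · simp only [hc, if_true]
      intro w hw; exact hacc w (by simpa using hw)
    · simp only [hc]
      intro w hw
      simp only [List.reverse_cons] at hw
      rcases (by simpa using hw : w ∈ acc ∨ w = cur.reverse) with h | rfl
      · exact hacc w h
      · refine ⟨by simpa using (List.isEmpty_eq_false_iff.mp (by simpa using hc)), ?_⟩
        intro c hc'; exact hcur c (by simpa using hc')
  | cons c s ih =>
    intro cur acc hacc hcur
    simp only [PySem.Chars.split₀.go]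
    by_cases hsp : PySem.Chars.isspace c = true
    · simp only [hsp, if_true]
      by_cases hc : cur.isEmpty = true
      · simp only [hc, if_true]; exact ih [] acc hacc (by simp)
      · simp only [hc]
        refine ih [] _ ?_ (by simp)
        intro w hw
        rcases List.mem_cons.mp hw with rfl | h
        · refine ⟨by simpa using (List.isEmpty_eq_false_iff.mp (by simpa using hc)), ?_⟩
          intro d hd; exact hcur d (by simpa using hd)
        · exact hacc w h
    · simp only [hsp]
      refine ih (c :: cur) acc hacc ?_
      intro d hd
      rcases List.mem_cons.mp hd with rfl | h
      · simpa using hsp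
      · exact hcur d h

-- every piece of split₀ is a nonempty whitespace-free word
theorem split0_pieces (s : List Char) :
    ∀ w ∈ PySem.Chars.split₀ s, w ≠ [] ∧ ∀ c ∈ w, PySem.Chars.isspace c = false :=
  split0_go_pieces s [] [] (by simp) (by simp)

theorem split0_go_word (w : List Char) (hc : ∀ c ∈ w, PySem.Chars.isspace c = false) :
    ∀ (cur : List Char) (acc : List (List Char)),
    PySem.Chars.split₀.go w cur acc = PySem.Chars.split₀.go [] (w.reverse ++ cur) acc := by
  induction w with
  | nil => intro cur acc; simp
  | cons c s ih =>
    intro cur acc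
    simp only [PySem.Chars.split₀.go]
    rw [if_neg (by simp [hc c (by simp)])]
    rw [ih (fun d hd => hc d (by simp [hd])) (c :: cur) acc]
    simp [PySem.Chars.split₀.go]

-- a nonempty whitespace-free word splits to itself
theorem split0_word (w : List Char) (hne : w ≠ []) (hc : ∀ c ∈ w, PySem.Chars.isspace c = false) :
    PySem.Chars.split₀ w = [w] := by
  unfold PySem.Chars.split₀
  rw [split0_go_word w hc [] []]
  simp [PySem.Chars.split₀.go, List.isEmpty_eq_false_iff.mpr (by simpa using hne)]

-- splitting a space-join of words gives the words back
theorem split0_join (ws : List (List Char))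
    (h : ∀ w ∈ ws, w ≠ [] ∧ ∀ c ∈ w, PySem.Chars.isspace c = false) :
    PySem.Chars.split₀ (PySem.Chars.join [' '] ws) = ws := by
  induction ws with
  | nil => simp [PySem.Chars.join_nil, PySem.Chars.split₀, PySem.Chars.split₀.go]
  | cons w ws ih =>
    rcases ws with _ | ⟨v, ws'⟩
    · rw [PySem.Chars.join_singleton]
      exact split0_word w (h w (by simp)).1 (h w (by simp)).2
    · rw [PySem.Chars.join_cons_cons]
      have h1 : w ++ [' '] ++ PySem.Chars.join [' '] (v :: ws') = w ++ ' ' :: PySem.Chars.join [' '] (v :: ws') := by simp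
      rw [h1, split0_append_space]
      rw [split0_word w (h w (by simp)).1 (h w (by simp)).2]
      rw [ih (fun u hu => h u (by simp [hu]))]
      simp

-- join over an appended singleton
theorem join_append_singleton (sep x : List Char) (ps : List (List Char)) (h : ps ≠ []) :
    PySem.Chars.join sep (ps ++ [x]) = PySem.Chars.join sep ps ++ sep ++ x := by
  induction ps with
  | nil => simp at h
  | cons p ps ih =>
    rcases ps with _ | ⟨q, ps'⟩
    · simp [PySem.Chars.join_singleton, PySem.Chars.join_cons_cons]
    · have h1 : (p :: q :: ps') ++ [x] = p :: q :: (ps' ++ [x]) := rfl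
      rw [h1, PySem.Chars.join_cons_cons]
      have h2 : q :: (ps' ++ [x]) = (q :: ps') ++ [x] := rfl
      rw [h2, ih (by simp), PySem.Chars.join_cons_cons]
      simp

-- String-level versions
theorem str_join_append_singleton (x : String) (ps : List String) (h : ps ≠ []) :
    PySem.Str.join " " (ps ++ [x]) = PySem.Str.join " " ps ++ " " ++ x := by
  apply String.toList_inj.mp
  simp only [String.toList_append, PySem.Str.toList_join, List.map_append, List.map_cons,
    List.map_nil]
  rw [join_append_singleton _ _ _ (by simpa using h)]

theorem str_split0_append_space (s t : String) :
    PySem.Str.split₀ (s ++ " " ++ t) = PySem.Str.split₀ s ++ PySem.Str.split₀ t := by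
  unfold PySem.Str.split₀
  have h1 : (s ++ " " ++ t).toList = s.toList ++ ' ' :: t.toList := by simp
  rw [h1, split0_append_space, List.map_append]

theorem str_split0_pieces (s : String) :
    ∀ w ∈ PySem.Str.split₀ s, w.toList ≠ [] ∧ ∀ c ∈ w.toList, PySem.Chars.isspace c = false := by
  intro w hw
  unfold PySem.Str.split₀ at hw
  rcases List.mem_map.mp hw with ⟨u, hu, rfl⟩
  simpa using split0_pieces s.toList u hu

theorem str_split0_join (ws : List String)
    (h : ∀ w ∈ ws, w.toList ≠ [] ∧ ∀ c ∈ w.toList, PySem.Chars.isspace c = false) :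
    PySem.Str.split₀ (PySem.Str.join " " ws) = ws := by
  unfold PySem.Str.split₀
  rw [PySem.Str.toList_join]
  have : PySem.Chars.split₀ (PySem.Chars.join " ".toList (ws.map String.toList)) = ws.map String.toList := by
    apply split0_join
    intro u hu
    rcases List.mem_map.mp hu with ⟨w, hw, rfl⟩
    exact h w hw
  rw [this]
  simp [Function.comp_def]

-- find? respects pointwise-equal predicates (not in Mathlib under this form)
theorem find?_congr_mem {α : Type} (p q : α → Bool) (l : List α) (h : ∀ a ∈ l, p a = q a) :
    l.find? p = l.find? q := by
  induction l with
  | nil => rfl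
  | cons a l ih =>
    simp only [List.find?_cons]
    rw [h a (by simp)]
    cases q a
    · exact ih (fun b hb => h b (by simp [hb]))
    · rfl

-- A's guarded search over [5..1] equals the unguarded search over [min(5,|w|,|nw|)..1]
theorem ov_eq (w nw : List String)
    (h3w : 3 ≤ PySem.List.len w) (h3n : 3 ≤ PySem.List.len nw) :
    ((PySem.List.pyRange 5 0 (-1)).find? (fun k =>
        decide (k ≤ PySem.List.len w) && decide (k ≤ PySem.List.len nw) &&
        (PySem.List.slice w (some (-k)) none == PySem.List.slice nw none (some k)))) =
    ((PySem.List.pyRange (min 5 (min (PySem.List.len w) (PySem.List.len nw))) 0 (-1)).find?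
        (fun m => PySem.List.slice w (some (-m)) none == PySem.List.slice nw none (some m))) := by
  set a := PySem.List.len w with ha
  set b := PySem.List.len nw with hb
  have hM : min 5 (min a b) = 3 ∨ min 5 (min a b) = 4 ∨ min 5 (min a b) = 5 := by omega
  have hr5 : PySem.List.pyRange 5 0 (-1) = [5, 4, 3, 2, 1] := by decide
  rcases hM with hM | hM | hM <;> rw [hM, hr5]
  · have hr : PySem.List.pyRange 3 0 (-1) = [3, 2, 1] := by decide
    rw [hr, show ([5, 4, 3, 2, 1] : List Int) = [5, 4] ++ [3, 2, 1] from rfl, List.find?_append]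
    have hnone : ([5, 4] : List Int).find? (fun k =>
        decide (k ≤ a) && decide (k ≤ b) &&
        (PySem.List.slice w (some (-k)) none == PySem.List.slice nw none (some k))) = none := by
      apply List.find?_eq_none.mpr
      intro k hk
      have hab : ¬(k ≤ a) ∨ ¬(k ≤ b) := by
        rcases (by simpa using hk : k = 5 ∨ k = 4) with rfl | rfl <;> omega
      rcases hab with h | h <;> simp [decide_eq_false h]
    rw [hnone, Option.none_or]
    apply find?_congr_mem
    intro k hk
    have hk' : 1 ≤ k ∧ k ≤ 3 := by rcases (by simpa using hk : k = 3 ∨ k = 2 ∨ k = 1) with rfl | rfl | rfl <;> omega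
    rw [decide_eq_true (by omega : k ≤ a), decide_eq_true (by omega : k ≤ b)]
    simp
  · have hr : PySem.List.pyRange 4 0 (-1) = [4, 3, 2, 1] := by decide
    rw [hr, show ([5, 4, 3, 2, 1] : List Int) = [5] ++ [4, 3, 2, 1] from rfl, List.find?_append]
    have hnone : ([5] : List Int).find? (fun k =>
        decide (k ≤ a) && decide (k ≤ b) &&
        (PySem.List.slice w (some (-k)) none == PySem.List.slice nw none (some k))) = none := by
      apply List.find?_eq_none.mpr
      intro k hk
      have hab : ¬(k ≤ a) ∨ ¬(k ≤ b) := by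
        rcases (by simpa using hk : k = 5) with rfl
        omega
      rcases hab with h | h <;> simp [decide_eq_false h]
    rw [hnone, Option.none_or]
    apply find?_congr_mem
    intro k hk
    have hk' : 1 ≤ k ∧ k ≤ 4 := by rcases (by simpa using hk : k = 4 ∨ k = 3 ∨ k = 2 ∨ k = 1) with rfl | rfl | rfl | rfl <;> omega
    rw [decide_eq_true (by omega : k ≤ a), decide_eq_true (by omega : k ≤ b)]
    simp
  · apply find?_congr_mem
    intro k hk
    have hk' : 1 ≤ k ∧ k ≤ 5 := by
      rcases (by simpa using hk : k = 5 ∨ k = 4 ∨ k = 3 ∨ k = 2 ∨ k = 1) with rfl | rfl | rfl | rfl | rfl <;> omega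
    rw [decide_eq_true (by omega : k ≤ a), decide_eq_true (by omega : k ≤ b)]
    simp

-- membership in the small descending ranges gives the bounds
theorem mem_desc (M k : Int) (hM : M = 3 ∨ M = 4 ∨ M = 5)
    (h : k ∈ PySem.List.pyRange M 0 (-1)) : 1 ≤ k ∧ k ≤ M := by
  rcases hM with rfl | rfl | rfl
  · rw [show PySem.List.pyRange 3 0 (-1) = [3, 2, 1] from by decide] at h
    simp at h; omega
  · rw [show PySem.List.pyRange 4 0 (-1) = [4, 3, 2, 1] from by decide] at h
    simp at h; omega
  · rw [show PySem.List.pyRange 5 0 (-1) = [5, 4, 3, 2, 1] from by decide] at h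
    simp at h; omega

-- B's ascending max-update fold equals A's descending first-match (Option.getD 0),
-- by exhausting the ≤ 2^5 truth assignments of the predicate on the concrete ranges
theorem asc_desc (M : Int) (hM : M = 3 ∨ M = 4 ∨ M = 5) (p : Int → Bool) :
    (PySem.List.pyRange 1 (M + 1) 1).foldl (fun b m => if p m then m else b) 0 =
      ((PySem.List.pyRange M 0 (-1)).find? p).getD 0 := by
  rcases hM with rfl | rfl | rfl
  · rw [show PySem.List.pyRange 1 (3 + 1) 1 = [1, 2, 3] from by decide,
      show PySem.List.pyRange 3 0 (-1) = [3, 2, 1] from by decide]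
    cases h1 : p 1 <;> cases h2 : p 2 <;> cases h3 : p 3 <;>
      simp [List.foldl, List.find?, h1, h2, h3]
  · rw [show PySem.List.pyRange 1 (4 + 1) 1 = [1, 2, 3, 4] from by decide,
      show PySem.List.pyRange 4 0 (-1) = [4, 3, 2, 1] from by decide]
    cases h1 : p 1 <;> cases h2 : p 2 <;> cases h3 : p 3 <;> cases h4 : p 4 <;>
      simp [List.foldl, List.find?, h1, h2, h3, h4]
  · rw [show PySem.List.pyRange 1 (5 + 1) 1 = [1, 2, 3, 4, 5] from by decide,
      show PySem.List.pyRange 5 0 (-1) = [5, 4, 3, 2, 1] from by decide]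
    cases h1 : p 1 <;> cases h2 : p 2 <;> cases h3 : p 3 <;> cases h4 : p 4 <;> cases h5 : p 5 <;>
      simp [List.foldl, List.find?, h1, h2, h3, h4, h5]

-- the tail slice: xs[-m:] on the full word list equals the drop-from-the-left slice
-- B takes on its ≤5-word tail
theorem tail_slice_eq (ws : List String) (m : Int) (h1 : 1 ≤ m) (h5 : m ≤ 5)
    (hw : m ≤ PySem.List.len ws) :
    PySem.List.slice ws (some (-m)) none =
      PySem.List.slice (ws.drop (ws.length - 5))
        (some (PySem.List.len (ws.drop (ws.length - 5)) - m)) none := by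
  have hlen : m ≤ (ws.length : Int) := by simpa [PySem.List.len] using hw
  have htl : (ws.drop (ws.length - 5)).length = ws.length - (ws.length - 5) := List.length_drop
  rw [PySem.List.slice_some_none, PySem.List.slice_some_none]
  have hc1 : PySem.List.clampIdx ws.length (-m) = ws.length - m.toNat := by
    simp only [PySem.List.clampIdx]; split_ifs <;> omega
  have hc2 : PySem.List.clampIdx (ws.drop (ws.length - 5)).length
      (PySem.List.len (ws.drop (ws.length - 5)) - m) =
      (ws.drop (ws.length - 5)).length - m.toNat := by
    simp only [PySem.List.clampIdx, PySem.List.len, htl]; split_ifs <;> omega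
  rw [hc1, hc2, List.drop_drop]
  congr 1
  omega

-- appending then re-taking the last-5 tail commutes with tracking the full word list
theorem drop5_append (ws kept : List String) :
    ((ws.drop (ws.length - 5)) ++ kept).drop (((ws.drop (ws.length - 5)) ++ kept).length - 5) =
      (ws ++ kept).drop ((ws ++ kept).length - 5) := by
  rw [List.drop_append, List.drop_append, List.drop_drop]
  have h1 : (ws.drop (ws.length - 5)).length = ws.length - (ws.length - 5) := List.length_drop
  congr 1
  · congr 1
    simp only [List.length_append, h1]
    omega
  · congr 1
    simp only [List.length_append, h1]
    omega

-- length of a slice-from on a nonnegative index, as Int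
theorem len_append_int (a b : List String) :
    PySem.List.len (a ++ b) = PySem.List.len a + PySem.List.len b := by
  simp [PySem.List.len]

-- the loop invariant relating A's accumulated string to B's (pieces, tail, count)
def JoinInv (joined : String) (st : List String × List String × Int) : Prop :=
  st.1 ≠ [] ∧ joined = PySem.Str.join " " st.1 ∧
  st.2.1 = (PySem.Str.split₀ joined).drop ((PySem.Str.split₀ joined).length - 5) ∧
  st.2.2 = PySem.List.len (PySem.Str.split₀ joined)

theorem joinStep_inv (joined : String) (st : List String × List String × Int) (t : String)
    (h : JoinInv joined st) : JoinInv (joinStepA joined t) (joinStepB st t) := by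
  obtain ⟨hne, hj, htl, hct⟩ := h
  by_cases ht : t = ""
  · simpa [joinStepA, joinStepB, ht] using ⟨hne, hj, htl, hct⟩
  · simp only [joinStepA, joinStepB, if_neg ht]
    set ws := PySem.Str.split₀ joined with hws
    set nw := PySem.Str.split₀ t with hnw
    -- the no-overlap update preserves the invariant (shared by both failure paths)
    have hnoov : JoinInv (joined ++ " " ++ t)
        (st.1 ++ [t], PySem.List.slice (st.2.1 ++ nw) (some (-5)) none,
         st.2.2 + PySem.List.len nw) := by
      refine ⟨by simp, ?_, ?_, ?_⟩
      · rw [str_join_append_singleton t st.1 hne, hj]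
      · show PySem.List.slice (st.2.1 ++ nw) (some (-5)) none = _
        rw [PySem.List.slice_from_neg_ofNat _ 5 (by omega), htl,
          str_split0_append_space, ← hws, ← hnw]
        exact drop5_append ws nw
      · rw [hct, str_split0_append_space, ← hws, ← hnw, len_append_int]
    by_cases hg : 3 ≤ PySem.List.len ws ∧ 3 ≤ PySem.List.len nw
    · have hg' : 3 ≤ st.2.2 ∧ 3 ≤ PySem.List.len nw := by rw [hct]; exact hg
      rw [if_pos hg, if_pos hg', ov_eq _ _ hg.1 hg.2]
      set M := min 5 (min (PySem.List.len ws) (PySem.List.len nw)) with hMdef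
      have hM : M = 3 ∨ M = 4 ∨ M = 5 := by omega
      have hM' : min 5 (min st.2.2 (PySem.List.len nw)) = M := by rw [hct]
      rw [hM', asc_desc M hM]
      have hfind :
          ((PySem.List.pyRange M 0 (-1)).find? (fun m =>
            PySem.List.slice st.2.1 (some (PySem.List.len st.2.1 - m)) none ==
              PySem.List.slice nw none (some m))) =
          ((PySem.List.pyRange M 0 (-1)).find? (fun m =>
            PySem.List.slice ws (some (-m)) none == PySem.List.slice nw none (some m))) := by
        apply find?_congr_mem
        intro m hm
        obtain ⟨hm1, hm2⟩ := mem_desc M m hM hm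
        rw [htl, ← tail_slice_eq ws m hm1 (by omega) (by omega)]
      rw [← hfind]
      cases hk : ((PySem.List.pyRange M 0 (-1)).find? (fun m =>
          PySem.List.slice st.2.1 (some (PySem.List.len st.2.1 - m)) none ==
            PySem.List.slice nw none (some m))) with
      | none => simpa [hk] using hnoov
      | some k =>
        have hk1 : 1 ≤ k := (mem_desc M k hM (List.mem_of_find?_eq_some hk)).1
        simp only [Option.getD_some]
        rw [if_pos (show k ≠ 0 by omega)]
        set kept := PySem.List.slice nw (some k) none with hkept
        have hkp : ∀ u ∈ kept, u.toList ≠ [] ∧ ∀ c ∈ u.toList, PySem.Chars.isspace c = false := by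
          intro u hu
          rw [hkept, PySem.List.slice_from _ (by omega : (0:Int) ≤ k)] at hu
          exact str_split0_pieces t u (List.mem_of_mem_drop hu)
        refine ⟨by simp, ?_, ?_, ?_⟩
        · rw [str_join_append_singleton _ st.1 hne, hj]
        · show PySem.List.slice (st.2.1 ++ kept) (some (-5)) none = _
          rw [PySem.List.slice_from_neg_ofNat _ 5 (by omega), htl,
            str_split0_append_space, ← hws, str_split0_join kept hkp]
          exact drop5_append ws kept
        · rw [hct, str_split0_append_space, ← hws, str_split0_join kept hkp, len_append_int]
    · have hg' : ¬ (3 ≤ st.2.2 ∧ 3 ≤ PySem.List.len nw) := by rw [hct]; exact hg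
      rw [if_neg hg, if_neg hg']
      simpa using hnoov

theorem joinFold_inv (ts : List String) (joined : String) (st : List String × List String × Int)
    (h : JoinInv joined st) : JoinInv (ts.foldl joinStepA joined) (ts.foldl joinStepB st) := by
  induction ts generalizing joined st with
  | nil => exact h
  | cons t ts ih => exact ih _ _ (joinStep_inv joined st t h)

-- ===== VERDICT (by name: the statement is the Claim_ definition above) =====
theorem join_chunks_py_spec : Claim_equal_join_chunks_py := by
  intro results _
  unfold Spec_join_chunks_py join_chunks_py join_chunks_py_alt
  by_cases h0 : results = []
  · simp [h0]
  · simp only [h0, if_false]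
    by_cases h1 : results.length = 1
    · simp [h1]
    · simp only [h1, if_false]
      have hfold :
          (PySem.List.pyRange 1 (PySem.List.len results)).foldl
            (fun joined i => joinStepA joined (PySem.List.pyGetD results i ""))
            (PySem.List.pyGetD results 0 "") =
          (results.drop 1).foldl joinStepA (PySem.List.pyGetD results 0 "") := by
        have := PySem.List.foldl_pyRange_pyGetD results "" joinStepA
          (PySem.List.pyGetD results 0 "") (a := 1) (by norm_num)
        simpa using this
      rw [hfold]
      have hinv : JoinInv ((results.drop 1).foldl joinStepA (PySem.List.pyGetD results 0 ""))
          ((results.drop 1).foldl joinStepB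
            ([PySem.List.pyGetD results 0 ""],
             PySem.List.slice (PySem.Str.split₀ (PySem.List.pyGetD results 0 "")) (some (-5)) none,
             PySem.List.len (PySem.Str.split₀ (PySem.List.pyGetD results 0 "")))) := by
        apply joinFold_inv
        refine ⟨by simp, ?_, ?_, rfl⟩
        · apply String.toList_inj.mp
          simp [PySem.Str.toList_join, PySem.Chars.join_singleton]
        · show PySem.List.slice _ (some (-5)) none = _
          rw [PySem.List.slice_from_neg_ofNat _ 5 (by omega)]
      rcases hinv with ⟨_, h2, _, _⟩
      rw [h2]
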